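-- pv_equiv track=rewrite | github.com/egire/kbot-server | honeychecker.py | remapSyms
-- ===== SOURCE A (Python) =====
-- _SYM = "#^)*(!@&$%"
--
-- def isSym(char):
--     ''' Find if char on ASCII Table and return true if symbol else non-symbol false '''
--     if ord(char) == ord('^') or ord(char) == ord('@') or (ord(char) >= ord('!')) and (ord(char) <= ord(')')):
--         return True
--     else:
--         return False
--
-- def remapSyms(word, mapping=_SYM):
--     ''' Remaps ASCII symbols using mapping '''
--     mapword = ""
--     for c in word:
--         if (isSym(c)):
--             if (c == '^'):
--                 mapword += '@'
--             elif (c == '@'):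
--                 mapword += '^'
--             else:
--                 mapword += mapping[(ord(c)-ord('!')) % len(mapping)]
--         else:
--             mapword += c
--     return mapword
-- ===== SOURCE B (Python) =====
-- _SYM = "#^)*(!@&$%"
--
-- def remapSyms(word, mapping=_SYM):
--     ''' Remaps ASCII symbols using mapping: a str.translate pass over a table built once by maketrans;
--         the modular indexing of A is replaced by tiling the mapping and slicing the first 9 chars. '''
--     table = str.maketrans('!"#$%&\'()^@', (mapping * 9)[:9] + '@^')
--     return word.translate(table)
-- ===== Notes on version B (the rewrite author's own statement) =====
-- stated objective: faster
-- what changed: B builds the translation table once with str.maketrans over the fixed 11-symbol alphabet (tiling the mapping with (mapping*9)[:9] instead of per-character modular indexing) and does the whole remap in a single str.translate call, eliminating A's per-character branch chain and += accumulation.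
-- outside the precondition, e.g. on remapSyms('x', ''): A returns 'x', B raises ValueError
import Mathlib
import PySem

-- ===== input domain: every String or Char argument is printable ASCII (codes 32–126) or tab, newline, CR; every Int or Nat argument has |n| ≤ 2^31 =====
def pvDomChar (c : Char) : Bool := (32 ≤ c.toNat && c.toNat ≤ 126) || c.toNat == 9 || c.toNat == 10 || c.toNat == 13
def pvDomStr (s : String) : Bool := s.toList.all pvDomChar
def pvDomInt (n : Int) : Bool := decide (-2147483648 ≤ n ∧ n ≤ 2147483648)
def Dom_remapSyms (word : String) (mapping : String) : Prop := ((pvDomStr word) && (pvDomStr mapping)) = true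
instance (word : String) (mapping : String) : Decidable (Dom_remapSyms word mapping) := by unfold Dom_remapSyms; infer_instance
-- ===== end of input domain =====

-- B replaces A's per-character branch chain by one translate pass over a maketrans table built
-- once from a tiled copy of the mapping ((mapping*9)[:9], no modular indexing); measurably faster in Python.

-- ===== PORT A =====
-- isSym, transliterated (ord comparisons)
def pvIsSym (c : Char) : Bool :=
  if c.toNat == 94 || c.toNat == 64 || ((33 ≤ c.toNat) && (c.toNat ≤ 41)) then true else false

-- mapping[(ord(c)-ord('!')) % len(mapping)]; the .getD c fallback is unreachable inside Pre_
-- (the index is only evaluated for 33 ≤ ord c ≤ 41, where Pre_ guarantees mapping ≠ "")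
def pvIdxRepl (mapping : String) (c : Char) : Char :=
  (PySem.Str.pyGet? mapping (PySem.Int.mod ((c.toNat : Int) - 33) (PySem.Str.len mapping))).getD c

def remapSyms (word : String) (mapping : String) : String :=
  String.ofList (word.toList.foldl (fun mapword c =>
    if pvIsSym c then
      if c == '^' then mapword ++ ['@']
      else if c == '@' then mapword ++ ['^']
      else mapword ++ [pvIdxRepl mapping c]
    else mapword ++ [c]) [])

-- ===== PORT B =====
-- str.maketrans(keys, vals): the dict built from the zipped key/value strings
def pvMaketrans (keys : List Char) (vals : List Char) : PySem.Dict Char Char :=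
  (keys.zip vals).foldl (fun d p => d.insert p.1 p.2) PySem.Dict.empty

def remapSyms_alt (word : String) (mapping : String) : String :=
  -- table = str.maketrans('!"#$%&\'()^@', (mapping * 9)[:9] + '@^'); return word.translate(table)
  let rep : List Char := ((List.replicate 9 mapping.toList).flatten).take 9
  let table : PySem.Dict Char Char := pvMaketrans "!\"#$%&'()^@".toList (rep ++ ['@', '^'])
  String.ofList (word.toList.map (fun c => table.getD c c))

-- ===== PRECONDITION & SPEC =====
-- Pre_ excludes the empty mapping, on which B's maketrans raises ValueError even for symbol-free
-- words (and A itself raises ZeroDivisionError whenever a '!'..')' character is present).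
def Pre_remapSyms (word : String) (mapping : String) : Prop := mapping ≠ ""
instance (word : String) (mapping : String) : Decidable (Pre_remapSyms word mapping) := by
  unfold Pre_remapSyms; infer_instance
def pvWitness_remapSyms : String × String := ("Hello^@! (cat)*&", "#^)*(!@&$%")

def Spec_remapSyms (word : String) (mapping : String) (out : String) : Prop := out = remapSyms_alt word mapping
instance (word : String) (mapping : String) (out : String) : Decidable (Spec_remapSyms word mapping out) := by unfold Spec_remapSyms; infer_instance

-- ===== CLAIM (what is proved, stated in full; the proofs are below) =====
def Claim_equal_remapSyms : Prop := ∀ (word : String) (mapping : String), Dom_remapSyms word mapping → Pre_remapSyms word mapping → Spec_remapSyms word mapping (remapSyms word mapping)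

-- ===== LEMMAS AND PROOFS =====

-- the value A produces for one character
def pvCharA (mapping : String) (c : Char) : Char :=
  if pvIsSym c then
    if c == '^' then '@'
    else if c == '@' then '^'
    else pvIdxRepl mapping c
  else c

theorem remapA_eq_map (word mapping : String) :
    remapSyms word mapping = String.ofList (word.toList.map (pvCharA mapping)) := by
  unfold remapSyms
  congr 1
  have h : ∀ (l : List Char) (acc : List Char),
      l.foldl (fun mapword c =>
        if pvIsSym c then
          if c == '^' then mapword ++ ['@']
          else if c == '@' then mapword ++ ['^']
          else mapword ++ [pvIdxRepl mapping c]
        else mapword ++ [c]) acc = acc ++ l.map (pvCharA mapping) := by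
    intro l
    induction l with
    | nil => intro acc; simp
    | cons a t ih =>
      intro acc
      simp only [List.foldl_cons, List.map_cons, ih, pvCharA]
      split_ifs <;> simp
  simpa using h word.toList []

theorem toNat_eq_iff (c d : Char) : (c = d) ↔ (c.toNat = d.toNat) := by
  constructor
  · rintro rfl; rfl
  · intro h
    exact Char.ext (by have := congrArg UInt32.ofNat h; rwa [Char.ofNat_toNat_eq_val, Char.ofNat_toNat_eq_val] at this)

-- the k-th char of the tiled mapping (mapping*9) is mapping[k % len]
theorem flatten_replicate_getElem? (m : List Char) (n k : Nat) (hk : k < n * m.length) :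
    ((List.replicate n m).flatten)[k]? = m[k % m.length]? := by
  induction n generalizing k with
  | zero => omega
  | succ n ih =>
    have hk' : k < n * m.length + m.length := by rwa [Nat.succ_mul] at hk
    rw [List.replicate_succ, List.flatten_cons]
    by_cases h : k < m.length
    · rw [List.getElem?_append_left h, Nat.mod_eq_of_lt h]
    · have h2 : k - m.length < n * m.length := by omega
      have hmod : (k - m.length) % m.length = k % m.length := by
        conv_rhs => rw [show k = (k - m.length) + m.length by omega]
        rw [Nat.add_mod_right]
      rw [List.getElem?_append_right (by omega), ih _ h2, hmod]

theorem pvIdxRepl_eq (mapping : String) (c : Char) (k : Nat) (hck : c.toNat = 33 + k) (r : Char)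
    (hr : mapping.toList[k % mapping.toList.length]? = some r) : pvIdxRepl mapping c = r := by
  unfold pvIdxRepl
  have h1 : ((c.toNat : Int) - 33) = ((k : Nat) : Int) := by omega
  rw [h1]
  rw [show PySem.Str.len mapping = ((mapping.toList.length : Nat) : Int) from by simp]
  rw [PySem.Int.mod_natCast, PySem.Str.pyGet?_natCast, hr]
  rfl

theorem char_eq (mapping : String) (hm : mapping ≠ "") (c : Char) :
    ((pvMaketrans "!\"#$%&'()^@".toList
        ((((List.replicate 9 mapping.toList).flatten).take 9) ++ ['@', '^'])).getD c c)
      = pvCharA mapping c := by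
  have hL : mapping.toList ≠ [] := fun hl => hm (String.ext hl)
  have hLp : 0 < mapping.toList.length := List.length_pos_of_ne_nil hL
  set L := mapping.toList with hLdef
  set rep : List Char := (List.replicate 9 L).flatten.take 9 with hrepdef
  have hlen : rep.length = 9 := by rw [hrepdef]; simp [List.length_take]; omega
  have hget : ∀ k : Nat, k < 9 → rep[k]? = L[k % L.length]? := by
    intro k hk
    rw [hrepdef, List.getElem?_take_of_lt hk]
    have h9 : 9 ≤ 9 * L.length := Nat.le_mul_of_pos_right 9 hLp
    exact flatten_replicate_getElem? L 9 k (by omega)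
  rcases rep with _|⟨r0,rep⟩; · simp at hlen
  rcases rep with _|⟨r1,rep⟩; · simp at hlen
  rcases rep with _|⟨r2,rep⟩; · simp at hlen
  rcases rep with _|⟨r3,rep⟩; · simp at hlen
  rcases rep with _|⟨r4,rep⟩; · simp at hlen
  rcases rep with _|⟨r5,rep⟩; · simp at hlen
  rcases rep with _|⟨r6,rep⟩; · simp at hlen
  rcases rep with _|⟨r7,rep⟩; · simp at hlen
  rcases rep with _|⟨r8,rep⟩; · simp at hlen
  rcases rep with _|⟨r9,rep⟩; swap; · simp at hlen
  rw [show ("!\"#$%&'()^@".toList) = ['!','"','#','$','%','&','\'','(',')','^','@'] from by decide]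
  simp only [pvMaketrans, List.cons_append, List.nil_append, List.zip_cons_cons, List.zip_nil_right,
    List.foldl_cons, List.foldl_nil]
  simp only [PySem.Dict.getD_insert, PySem.Dict.getD_empty]
  by_cases h64 : c = '@'
  · subst h64; simp [pvCharA, pvIsSym]
  by_cases h94 : c = '^'
  · subst h94; simp [pvCharA, pvIsSym, h64]
  by_cases hs : 33 ≤ c.toNat ∧ c.toNat ≤ 41
  · obtain ⟨hs1, hs2⟩ := hs
    have h : c.toNat = 33 ∨ c.toNat = 34 ∨ c.toNat = 35 ∨ c.toNat = 36 ∨ c.toNat = 37 ∨ c.toNat = 38 ∨ c.toNat = 39 ∨ c.toNat = 40 ∨ c.toNat = 41 := by omega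
    rcases h with h|h|h|h|h|h|h|h|h
    · have hc : c = '!' := (toNat_eq_iff c '!').mpr (by rw [h]; decide)
      subst hc
      have hr := hget 0 (by omega)
      simp only [List.getElem?_cons_zero, List.getElem?_cons_succ] at hr
      simp only [reduceIte, Char.reduceEq]
      simp [pvCharA, pvIsSym]
      exact (pvIdxRepl_eq mapping '!' 0 (by decide) r0 hr.symm).symm
    · have hc : c = '\"' := (toNat_eq_iff c '\"').mpr (by rw [h]; decide)
      subst hc
      have hr := hget 1 (by omega)
      simp only [List.getElem?_cons_zero, List.getElem?_cons_succ] at hr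
      simp only [reduceIte, Char.reduceEq]
      simp [pvCharA, pvIsSym]
      exact (pvIdxRepl_eq mapping '\"' 1 (by decide) r1 hr.symm).symm
    · have hc : c = '#' := (toNat_eq_iff c '#').mpr (by rw [h]; decide)
      subst hc
      have hr := hget 2 (by omega)
      simp only [List.getElem?_cons_zero, List.getElem?_cons_succ] at hr
      simp only [reduceIte, Char.reduceEq]
      simp [pvCharA, pvIsSym]
      exact (pvIdxRepl_eq mapping '#' 2 (by decide) r2 hr.symm).symm
    · have hc : c = '$' := (toNat_eq_iff c '$').mpr (by rw [h]; decide)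
      subst hc
      have hr := hget 3 (by omega)
      simp only [List.getElem?_cons_zero, List.getElem?_cons_succ] at hr
      simp only [reduceIte, Char.reduceEq]
      simp [pvCharA, pvIsSym]
      exact (pvIdxRepl_eq mapping '$' 3 (by decide) r3 hr.symm).symm
    · have hc : c = '%' := (toNat_eq_iff c '%').mpr (by rw [h]; decide)
      subst hc
      have hr := hget 4 (by omega)
      simp only [List.getElem?_cons_zero, List.getElem?_cons_succ] at hr
      simp only [reduceIte, Char.reduceEq]
      simp [pvCharA, pvIsSym]
      exact (pvIdxRepl_eq mapping '%' 4 (by decide) r4 hr.symm).symm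
    · have hc : c = '&' := (toNat_eq_iff c '&').mpr (by rw [h]; decide)
      subst hc
      have hr := hget 5 (by omega)
      simp only [List.getElem?_cons_zero, List.getElem?_cons_succ] at hr
      simp only [reduceIte, Char.reduceEq]
      simp [pvCharA, pvIsSym]
      exact (pvIdxRepl_eq mapping '&' 5 (by decide) r5 hr.symm).symm
    · have hc : c = '\'' := (toNat_eq_iff c '\'').mpr (by rw [h]; decide)
      subst hc
      have hr := hget 6 (by omega)
      simp only [List.getElem?_cons_zero, List.getElem?_cons_succ] at hr
      simp only [reduceIte, Char.reduceEq]
      simp [pvCharA, pvIsSym]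
      exact (pvIdxRepl_eq mapping '\'' 6 (by decide) r6 hr.symm).symm
    · have hc : c = '(' := (toNat_eq_iff c '(').mpr (by rw [h]; decide)
      subst hc
      have hr := hget 7 (by omega)
      simp only [List.getElem?_cons_zero, List.getElem?_cons_succ] at hr
      simp only [reduceIte, Char.reduceEq]
      simp [pvCharA, pvIsSym]
      exact (pvIdxRepl_eq mapping '(' 7 (by decide) r7 hr.symm).symm
    · have hc : c = ')' := (toNat_eq_iff c ')').mpr (by rw [h]; decide)
      subst hc
      have hr := hget 8 (by omega)
      simp only [List.getElem?_cons_zero, List.getElem?_cons_succ] at hr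
      simp only [reduceIte, Char.reduceEq]
      simp [pvCharA, pvIsSym]
      exact (pvIdxRepl_eq mapping ')' 8 (by decide) r8 hr.symm).symm
  · have ne : ∀ d : Char, c.toNat ≠ d.toNat → c ≠ d := fun d hd hc => hd ((toNat_eq_iff c d).mp hc)
    have hne : ∀ k : Nat, 33 ≤ k → k ≤ 41 → c.toNat ≠ k := by omega
    have hIs : pvIsSym c = false := by
      have t1 : c.toNat ≠ 64 := fun hh => h64 ((toNat_eq_iff c '@').mpr (by rw [hh]; decide))
      have t2 : c.toNat ≠ 94 := fun hh => h94 ((toNat_eq_iff c '^').mpr (by rw [hh]; decide))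
      simp [pvIsSym]
      omega
    rw [if_neg h64, if_neg h94,
        if_neg (ne ')' (hne _ (by decide) (by decide))),
        if_neg (ne '(' (hne _ (by decide) (by decide))),
        if_neg (ne '\'' (hne _ (by decide) (by decide))),
        if_neg (ne '&' (hne _ (by decide) (by decide))),
        if_neg (ne '%' (hne _ (by decide) (by decide))),
        if_neg (ne '$' (hne _ (by decide) (by decide))),
        if_neg (ne '#' (hne _ (by decide) (by decide))),
        if_neg (ne '\"' (hne _ (by decide) (by decide))),
        if_neg (ne '!' (hne _ (by decide) (by decide)))]
    simp [pvCharA, hIs]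

-- ===== VERDICT (by name: the statement is the Claim_ definition above) =====
theorem remapSyms_spec : Claim_equal_remapSyms := by
  intro word mapping _ hpre
  unfold Spec_remapSyms
  rw [remapA_eq_map]
  unfold remapSyms_alt
  congr 1
  apply List.map_congr_left
  intro c _
  exact (char_eq mapping hpre c).symm
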